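-- pv_equiv track=rewrite | github.com/ArslanTu/algorithm | contests/2023/0806/p2 copy.py | canSplitArray
-- ===== SOURCE A (Python) =====
-- from typing import List
--
-- def canSplitArray(nums: List[int], m: int) -> bool:
--     def check_subarrays(arr, m):
--         count = 1
--         cur_sum = 0
--         for num in arr:
--             cur_sum += num
--             if cur_sum > m:
--                 count += 1
--                 cur_sum = num
--         return count
--
--     left, right = max(nums), sum(nums)
--     while left < right:
--         mid = (left + right) // 2
--         if check_subarrays(nums, mid) <= m:
--             right = mid
--         else:
--             left = mid + 1
--     return left == max(nums)
-- ===== SOURCE B (Python) =====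
-- from typing import List
--
-- def canSplitArray(nums: List[int], m: int) -> bool:
--     # The smallest per-piece bound any split can achieve is max(nums): every
--     # element must fit in some piece.  So the array splits into at most m
--     # pieces at that bound iff one greedy left-to-right pass at threshold
--     # max(nums) needs at most m pieces.  One O(n) pass, no search.
--     mx = max(nums)
--     count, cur = 1, 0
--     for x in nums:
--         cur += x
--         if cur > mx:
--             count, cur = count + 1, x
--     return count <= m
-- ===== Notes on version B (the rewrite author's own statement) =====
-- stated objective: faster
-- what changed: Replaces A's binary search over thresholds by a single greedy pass at threshold max(nums) (the minimum attainable piece bound); Pre_ excludes the empty list (ValueError) and the out-of-domain corners where the two answers can drift apart: lists with a negative element when 1 <= m < len(nums) (A's answer there is an accident of its non-monotone binary-search trajectory) and m < 1 when sum <= max (A's empty search interval vacuously returns True); inputs with m >= len(nums), or m < 1 with max < sum, stay inside Pre_ whatever the signs.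
-- outside the precondition, e.g. on canSplitArray([4, 1, -3, 4, 2], 2): A returns False, B returns True; on canSplitArray([5], 0): A returns True, B returns False
import Mathlib
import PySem

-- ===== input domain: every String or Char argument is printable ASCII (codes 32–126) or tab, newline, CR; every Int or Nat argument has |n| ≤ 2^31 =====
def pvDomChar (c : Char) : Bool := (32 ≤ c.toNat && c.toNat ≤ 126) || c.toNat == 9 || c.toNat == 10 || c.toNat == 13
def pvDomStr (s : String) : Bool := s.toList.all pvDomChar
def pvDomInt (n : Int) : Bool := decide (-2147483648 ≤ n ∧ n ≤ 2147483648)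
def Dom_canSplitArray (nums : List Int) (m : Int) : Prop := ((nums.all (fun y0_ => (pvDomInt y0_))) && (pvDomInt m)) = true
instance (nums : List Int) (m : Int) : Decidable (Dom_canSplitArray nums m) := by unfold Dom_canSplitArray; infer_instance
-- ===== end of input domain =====

-- B replaces A's binary search over thresholds by one greedy pass at threshold max(nums)
-- (exact on the stated domain: nonempty, nonnegative elements, m >= 1): O(n) instead of
-- O(n log(sum)).


-- ===== PORT A =====
-- inner helper check_subarrays: greedy piece count at threshold t, as a fold over (count, cur_sum)
def checkSubarrays (arr : List Int) (t : Int) : Int :=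
  (arr.foldl (fun (st : Int × Int) num =>
      let cur := st.2 + num
      if cur > t then (st.1 + 1, num) else (st.1, cur)) (1, 0)).1

-- the 'while left < right' binary-search loop of A ('mid = (left+right)//2' inlined);
-- structurally recursive on a fuel bound: each iteration shrinks r - l by at least 1, so
-- fuel = (right - left).toNat at the call site makes this the exact while loop
def loopA (nums : List Int) (m : Int) : Nat → Int → Int → Int
  | 0, l, _ => l
  | fuel + 1, l, r =>
    if l < r then
      if checkSubarrays nums (PySem.Int.floordiv (l + r) 2) ≤ m then
        loopA nums m fuel l (PySem.Int.floordiv (l + r) 2)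
      else loopA nums m fuel (PySem.Int.floordiv (l + r) 2 + 1) r
    else l

def canSplitArray (nums : List Int) (m : Int) : Bool :=
  -- max(nums) raises ValueError on []; Pre_ excludes the empty list, so the .getD 0 default is never reached
  let mx := (PySem.List.max? nums (fun y => y)).getD 0
  let s := nums.foldl (· + ·) 0
  decide (loopA nums m (s - mx).toNat mx s = mx)

-- ===== PORT B =====
-- Source B: one greedy left-to-right pass at threshold max(nums), then compare the piece count with m
def canSplitArray_alt (nums : List Int) (m : Int) : Bool :=
  let mx := (PySem.List.max? nums (fun y => y)).getD 0
  let st := nums.foldl (fun (st : Int × Int) x =>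
      let cur := st.2 + x
      if cur > mx then (st.1 + 1, x) else (st.1, cur)) (1, 0)
  decide (st.1 ≤ m)

-- ===== PRECONDITION & SPEC =====
-- Pre_ excludes the empty list (max([]) raises ValueError) and the inputs outside the split
-- problem's natural domain on which the two answers can drift apart: lists with a negative
-- element when 1 ≤ m < len(nums) (there A's answer is an accident of its binary-search midpoint
-- trajectory, the greedy predicate being non-monotone), and m < 1 when sum ≤ max (there A's
-- empty search interval returns True vacuously).  Inputs with m ≥ len(nums), or with m < 1 and
-- max < sum, stay inside Pre_ whatever the signs of the elements.
def Pre_canSplitArray (nums : List Int) (m : Int) : Prop :=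
  nums ≠ [] ∧
    (((∀ x ∈ nums, 0 ≤ x) ∧ 1 ≤ m) ∨ (nums.length : Int) ≤ m ∨
      (m < 1 ∧ (PySem.List.max? nums (fun y => y)).getD 0 < nums.sum))
instance (nums : List Int) (m : Int) : Decidable (Pre_canSplitArray nums m) := by
  unfold Pre_canSplitArray; infer_instance

def pvWitness_canSplitArray : List Int × Int := ([7, 2, 5, 10, 8], 2)

def Spec_canSplitArray (nums : List Int) (m : Int) (out : Bool) : Prop := out = canSplitArray_alt nums m
instance (nums : List Int) (m : Int) (out : Bool) : Decidable (Spec_canSplitArray nums m out) := by unfold Spec_canSplitArray; infer_instance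

-- ===== CLAIM =====
def Claim_equal_canSplitArray : Prop := ∀ (nums : List Int) (m : Int), Dom_canSplitArray nums m → Pre_canSplitArray nums m → Spec_canSplitArray nums m (canSplitArray nums m)

-- ===== LEMMAS AND PROOFS =====

-- the shared greedy step at threshold t
def gstep (t : Int) : Int × Int → Int → Int × Int := fun st x =>
  let cur := st.2 + x
  if cur > t then (st.1 + 1, x) else (st.1, cur)

theorem check_eq_fold (arr : List Int) (t : Int) :
    checkSubarrays arr t = (arr.foldl (gstep t) (1, 0)).1 := rfl

-- monotonicity of the greedy piece count in the threshold, for nonnegative elements: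
-- coupling invariant c2 < c1 ∨ (c1 = c2 ∧ cur2 ≤ cur1) between the run at t1 (≤) and at t2
theorem mono_aux (t1 t2 : Int) (ht : t1 ≤ t2) :
    ∀ (arr : List Int), (∀ x ∈ arr, 0 ≤ x) → ∀ c1 cur1 c2 cur2, 0 ≤ cur1 → 0 ≤ cur2 →
      (c2 < c1 ∨ (c1 = c2 ∧ cur2 ≤ cur1)) →
      (arr.foldl (gstep t2) (c2, cur2)).1 ≤ (arr.foldl (gstep t1) (c1, cur1)).1 := by
  intro arr
  induction arr with
  | nil =>
      intro _ c1 cur1 c2 cur2 _ _ hinv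
      simp only [List.foldl_nil]
      rcases hinv with h | ⟨h, _⟩ <;> omega
  | cons a rest ih =>
      intro hnn c1 cur1 c2 cur2 h1 h2 hinv
      have ha : 0 ≤ a := hnn a (by simp)
      have hrest : ∀ x ∈ rest, 0 ≤ x := fun x hx => hnn x (by simp [hx])
      simp only [List.foldl_cons, gstep]
      by_cases hb1 : cur1 + a > t1 <;> by_cases hb2 : cur2 + a > t2
      · rw [if_pos hb1, if_pos hb2]
        apply ih hrest _ _ _ _ ha ha
        rcases hinv with h | ⟨h, _⟩
        · exact Or.inl (by omega)
        · exact Or.inr ⟨by omega, le_rfl⟩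
      · rw [if_pos hb1, if_neg hb2]
        apply ih hrest _ _ _ _ ha (by omega)
        exact Or.inl (by rcases hinv with h | ⟨h, _⟩ <;> omega)
      · rw [if_neg hb1, if_pos hb2]
        apply ih hrest _ _ _ _ (by omega) ha
        rcases hinv with h | ⟨h, h'⟩
        · by_cases hc : c2 + 1 < c1
          · exact Or.inl hc
          · exact Or.inr ⟨by omega, by omega⟩
        · exfalso; omega
      · rw [if_neg hb1, if_neg hb2]
        apply ih hrest _ _ _ _ (by omega) (by omega)
        rcases hinv with h | ⟨h, h'⟩
        · exact Or.inl h
        · exact Or.inr ⟨h, by omega⟩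

-- when the whole array fits under the threshold, the greedy pass never splits
theorem one_piece (t : Int) :
    ∀ (arr : List Int) (c cur : Int), (∀ x ∈ arr, 0 ≤ x) → cur + arr.sum ≤ t →
      arr.foldl (gstep t) (c, cur) = (c, cur + arr.sum) := by
  intro arr
  induction arr with
  | nil => intro c cur _ _; simp [List.foldl_nil]
  | cons a rest ih =>
      intro c cur hnn hle
      have hrs : 0 ≤ rest.sum := List.sum_nonneg (fun x hx => hnn x (by simp [hx]))
      have hsum : (a :: rest).sum = a + rest.sum := by simp
      rw [hsum] at hle
      have hna : ¬ (cur + a > t) := by omega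
      simp only [List.foldl_cons, gstep, if_neg hna]
      rw [ih c (cur + a) (fun x hx => hnn x (by simp [hx])) (by omega)]
      rw [hsum]; ring_nf

-- A's 'left' never decreases below its initial value
theorem loopA_ge (nums : List Int) (m : Int) :
    ∀ (fuel : Nat) (l r : Int), l ≤ loopA nums m fuel l r := by
  intro fuel
  induction fuel with
  | zero => intro l r; exact le_rfl
  | succ n ih =>
      intro l r
      rw [loopA]
      by_cases h : l < r
      · rw [if_pos h]
        have hb := PySem.Int.floordiv_two_mid_bounds (le_of_lt h)
        by_cases hc : checkSubarrays nums (PySem.Int.floordiv (l + r) 2) ≤ m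
        · rw [if_pos hc]; exact ih l _
        · rw [if_neg hc]
          have := ih (PySem.Int.floordiv (l + r) 2 + 1) r
          omega
      · rw [if_neg h]

-- if every threshold ≥ l passes the check, the search never moves 'left'
theorem loop_stay (nums : List Int) (m : Int) (l : Int)
    (hall : ∀ t, l ≤ t → checkSubarrays nums t ≤ m) :
    ∀ (fuel : Nat) (r : Int), loopA nums m fuel l r = l := by
  intro fuel
  induction fuel with
  | zero => intro r; rfl
  | succ n ih =>
      intro r
      rw [loopA]
      by_cases h : l < r
      · have hb := PySem.Int.floordiv_two_mid_bounds (le_of_lt h)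
        rw [if_pos h, if_pos (hall _ hb.1)]
        exact ih _
      · rw [if_neg h]

-- if the check fails at 'left' and the interval is nonempty, the search moves 'left' up
-- (given enough fuel to run the loop to completion)
theorem loop_ne (nums : List Int) (m : Int) :
    ∀ (fuel : Nat) (l r : Int), (r - l).toNat ≤ fuel →
      ¬ checkSubarrays nums l ≤ m → l < r → loopA nums m fuel l r ≠ l := by
  intro fuel
  induction fuel with
  | zero => intro l r hf _ hlr; omega
  | succ n ih =>
      intro l r hf hn hlr
      rw [loopA, if_pos hlr]
      have hb := PySem.Int.floordiv_two_mid_bounds (le_of_lt hlr)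
      have hstrict : PySem.Int.floordiv (l + r) 2 < r :=
        (PySem.Int.floordiv_lt_iff_lt_mul (by norm_num)).mpr (by omega)
      by_cases hc : checkSubarrays nums (PySem.Int.floordiv (l + r) 2) ≤ m
      · rw [if_pos hc]
        have hlt : l < PySem.Int.floordiv (l + r) 2 := by
          rcases lt_or_eq_of_le hb.1 with h' | h'
          · exact h'
          · exact absurd (h' ▸ hc) hn
        exact ih l _ (by omega) hn hlt
      · rw [if_neg hc]
        have hge := loopA_ge nums m n (PySem.Int.floordiv (l + r) 2 + 1) r
        intro heq
        omega

-- the greedy counter never decreases its count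
theorem count_ge (t : Int) :
    ∀ (arr : List Int) (c cur : Int), c ≤ (arr.foldl (gstep t) (c, cur)).1 := by
  intro arr
  induction arr with
  | nil => intro c cur; exact le_rfl
  | cons a rest ih =>
      intro c cur
      simp only [List.foldl_cons, gstep]
      by_cases hb : cur + a > t
      · rw [if_pos hb]; have := ih (c + 1) a; omega
      · rw [if_neg hb]; exact ih c _

-- with every element ≤ t and a current chunk that already fits (or is empty),
-- the greedy counter adds at most one count per element
theorem count_bound (t : Int) :
    ∀ (arr : List Int) (c cur : Int), (∀ x ∈ arr, x ≤ t) → (cur ≤ t ∨ cur = 0) →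
      (arr.foldl (gstep t) (c, cur)).1 ≤ c + (arr.length : Int) := by
  intro arr
  induction arr with
  | nil => intro c cur _ _; simp
  | cons a rest ih =>
      intro c cur hle hcur
      have ha : a ≤ t := hle a (by simp)
      have hrest : ∀ x ∈ rest, x ≤ t := fun x hx => hle x (by simp [hx])
      simp only [List.foldl_cons, gstep]
      by_cases hb : cur + a > t
      · rw [if_pos hb]
        have := ih (c + 1) a hrest (Or.inl ha)
        simp only [List.length_cons]
        push_cast
        omega
      · rw [if_neg hb]
        have := ih c (cur + a) hrest (Or.inl (by omega))
        simp only [List.length_cons]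
        push_cast
        omega

-- with every element ≤ t, the greedy pass from the start needs at most len(arr) pieces
-- (the first element never opens a second piece)
theorem check_le_len (t : Int) (a : Int) (rest : List Int)
    (hle : ∀ x ∈ a :: rest, x ≤ t) :
    checkSubarrays (a :: rest) t ≤ ((a :: rest).length : Int) := by
  have ha : a ≤ t := hle a (by simp)
  have hna : ¬ ((0 : Int) + a > t) := by omega
  rw [check_eq_fold]
  simp only [List.foldl_cons, gstep, if_neg hna]
  have := count_bound t rest 1 (0 + a) (fun x hx => hle x (by simp [hx])) (Or.inl (by omega))
  simp only [List.length_cons]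
  push_cast
  push_cast at this
  omega

-- ===== VERDICT =====
theorem canSplitArray_spec : Claim_equal_canSplitArray := by
  intro nums m _ hpre
  obtain ⟨hne, hcase⟩ := hpre
  obtain ⟨v, hv⟩ : ∃ v, PySem.List.max? nums (fun y => y) = some v := by
    cases h : PySem.List.max? nums (fun y => y) with
    | none => exact absurd ((PySem.List.max?_eq_none_iff nums (fun y => y)).mp h) hne
    | some v => exact ⟨v, rfl⟩
  have hvmax : ∀ y ∈ nums, y ≤ v := PySem.List.max?_isMax hv
  unfold Spec_canSplitArray canSplitArray canSplitArray_alt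
  simp only [hv, Option.getD_some]
  have halt : (nums.foldl (fun (st : Int × Int) x =>
      let cur := st.2 + x
      if cur > v then (st.1 + 1, x) else (st.1, cur)) (1, 0)).1 = checkSubarrays nums v := rfl
  rw [halt, Bool.eq_iff_iff, decide_eq_true_iff, decide_eq_true_iff]
  have hfold : nums.foldl (· + ·) 0 = nums.sum := List.sum_eq_foldl.symm
  rw [hv] at hcase
  simp only [Option.getD_some] at hcase
  have hge1 : (1 : Int) ≤ checkSubarrays nums v := by
    rw [check_eq_fold]; exact count_ge v nums 1 0
  rcases hcase with ⟨hnn, hm⟩ | hlen | ⟨hm, hs⟩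
  · -- natural domain: nonnegative elements, m ≥ 1
    constructor
    · intro hl
      by_contra hc
      have hs : v < nums.foldl (· + ·) 0 := by
        by_contra hs'
        have h1 : checkSubarrays nums v = 1 := by
          rw [check_eq_fold, one_piece v nums 1 0 hnn (by rw [← hfold]; omega)]
        exact hc (by omega)
      exact loop_ne nums m _ v _ le_rfl hc hs hl
    · intro hc
      exact loop_stay nums m v (fun t ht => le_trans
        (by rw [check_eq_fold, check_eq_fold]
            exact mono_aux v t ht nums hnn 1 0 1 0 le_rfl le_rfl (Or.inr ⟨rfl, le_rfl⟩)) hc) _ _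
  · -- m ≥ len(nums): every greedy count fits, both sides answer True
    obtain ⟨a, rest, rfl⟩ : ∃ a rest, nums = a :: rest := by
      cases nums with
      | nil => exact absurd rfl hne
      | cons a rest => exact ⟨a, rest, rfl⟩
    have hall : ∀ t, v ≤ t → checkSubarrays (a :: rest) t ≤ m := fun t ht =>
      le_trans (check_le_len t a rest (fun x hx => le_trans (hvmax x hx) ht)) hlen
    exact iff_of_true (loop_stay _ m v hall _ _) (hall v le_rfl)
  · -- m < 1 with max < sum: both sides answer False
    have hc : ¬ checkSubarrays nums v ≤ m := by omega
    rw [← hfold] at hs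
    exact iff_of_false (loop_ne nums m _ v _ le_rfl hc hs) hc
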